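-- pv_equiv track=rewrite | github.com/debdattasarkar/DSA | 2. GFG/1. Arrays/(M) Group Balls by Sequence/py_sol.py | validgroup
-- ===== SOURCE A (Python) =====
-- from collections import Counter
--
-- def validgroup(arr ,k):
--     # Code here
--     if len(arr) % k != 0:
--         return False
--
--     arr.sort()
--     freq = Counter(arr)
--
--     for num in arr:
--         if freq[num] == 0:
--             continue
--
--         # Try to form a group starting at num
--         for i in range(k):
--             if freq[num + i] == 0:
--                 return False
--             freq[num + i] -= 1
--
--     return True
-- ===== SOURCE B (Python) =====
-- from collections import Counter
--
-- def validgroup(arr, k):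
--     # Sliding-window scan over the sorted distinct values: `carry` counts the
--     # open groups that must continue at the next consecutive value; `window`
--     # holds how many groups were opened at each of the last < k values of the
--     # current consecutive run.
--     if len(arr) % k != 0:
--         return False
--     freq = Counter(arr)
--     window = []
--     carry = 0
--     prev = None
--     for v in sorted(freq):
--         if prev is None or v != prev + 1:
--             if carry > 0:
--                 return False
--             window = []
--         c = freq[v]
--         if c < carry:
--             return False
--         window.append(c - carry)
--         carry = c
--         if len(window) == k:
--             carry -= window.pop(0)
--         prev = v
--     return carry == 0
-- ===== Notes on version B (the rewrite author's own statement) =====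
-- stated objective: alternative
-- what changed: Instead of sorting the whole array and greedily consuming one group of k consecutive counts per element, B walks the sorted distinct values once with a sliding window of group-open counts and a carry of groups that must continue at the next value; equivalence is about the return value only (A additionally sorts arr in place).
-- intended difference: For negative k whose absolute value divides the length of a nonempty array, A's empty range(k) consumes nothing and it returns True; B returns False, the intended value since no array partitions into groups of negative size. — e.g. on validgroup([1, 1], -2): A returns true, B returns false
import Mathlib
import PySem

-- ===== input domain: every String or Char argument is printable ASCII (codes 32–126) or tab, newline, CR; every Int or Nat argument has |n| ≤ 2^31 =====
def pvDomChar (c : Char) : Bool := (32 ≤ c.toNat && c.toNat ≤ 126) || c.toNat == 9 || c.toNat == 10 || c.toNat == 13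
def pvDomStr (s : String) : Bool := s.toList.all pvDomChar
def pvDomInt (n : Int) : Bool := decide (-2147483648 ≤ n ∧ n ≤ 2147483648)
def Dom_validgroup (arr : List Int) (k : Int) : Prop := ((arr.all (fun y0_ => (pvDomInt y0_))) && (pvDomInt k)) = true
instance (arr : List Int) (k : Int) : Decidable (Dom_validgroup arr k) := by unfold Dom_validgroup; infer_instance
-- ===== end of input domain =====

-- B replaces A's per-element greedy group formation by a single sliding-window scan over the
-- sorted distinct values (a carry of open groups plus the opens of the last < k values).
-- Equivalence is about the RETURN value only: A additionally sorts `arr` in place (B does not).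

-- ===== PORT A =====
-- inner loop: `for i in range(k): if freq[num+i]==0: return False; freq[num+i]-=1`
def vgInnerA (freq : PySem.Dict Int Int) (num : Int) : List Int → Option (PySem.Dict Int Int)
  | [] => some freq
  | i :: is =>
    if freq.getD (num + i) 0 = 0 then none
    else vgInnerA (freq.modify (num + i) 0 (· - 1)) num is

-- outer loop: `for num in arr: …`
def vgLoopA (freq : PySem.Dict Int Int) (k : Int) : List Int → Bool
  | [] => true
  | num :: rest =>
    if freq.getD num 0 = 0 then vgLoopA freq k rest
    else
      match vgInnerA freq num (PySem.List.pyRange 0 k 1) with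
      | none => false
      | some f' => vgLoopA f' k rest

def validgroup (arr : List Int) (k : Int) : Bool :=
  if PySem.Int.mod (arr.length : Int) k ≠ 0 then false
  else
    let s := PySem.List.sorted arr (fun x => x) false
    vgLoopA (PySem.Dict.counter s) k s

-- ===== PORT B =====
-- `for v in sorted(freq): …` with state (window, carry, prev); `window.pop(0)` is taken on a
-- nonempty window (its length is k ≥ 1 there), so headD/tail is exact.
def vgScanB (freq : PySem.Dict Int Int) (k : Int) : List Int → List Int → Int → Option Int → Bool
  | [], _window, carry, _prev => decide (carry = 0)
  | v :: vs, window, carry, prev =>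
    let isGap : Bool := match prev with
      | none => true
      | some p => decide (v ≠ p + 1)
    if isGap && decide (0 < carry) then false
    else
      let window1 := if isGap then [] else window
      let c := freq.getD v 0
      if c < carry then false
      else
        let window2 := window1 ++ [c - carry]
        if (window2.length : Int) = k then
          vgScanB freq k vs window2.tail (c - window2.headD 0) (some v)
        else
          vgScanB freq k vs window2 c (some v)

def validgroup_alt (arr : List Int) (k : Int) : Bool :=
  if PySem.Int.mod (arr.length : Int) k ≠ 0 then false
  else
    let freq := PySem.Dict.counter arr
    vgScanB freq k (PySem.List.sorted freq.keys (fun x => x) false) [] 0 none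

-- ===== PRECONDITION & SPEC =====
-- k = 0 makes `len(arr) % k` raise ZeroDivisionError in both programs.
def Pre_validgroup (arr : List Int) (k : Int) : Prop := k ≠ 0
instance (arr : List Int) (k : Int) : Decidable (Pre_validgroup arr k) := by unfold Pre_validgroup; infer_instance
def pvWitness_validgroup : List Int × Int := ([3, 2, 1, 2, 3, 4], 3)

-- For negative k whose absolute value divides the length of a nonempty array, A's empty
-- range(k) consumes nothing and it returns True; B returns False, the intended value since
-- no array partitions into groups of negative size.
def D_validgroup (arr : List Int) (k : Int) : Prop := k < 0 ∧ arr ≠ [] ∧ (arr.length : Int) % k = 0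
instance (arr : List Int) (k : Int) : Decidable (D_validgroup arr k) := by unfold D_validgroup; infer_instance

def Spec_validgroup (arr : List Int) (k : Int) (out : Bool) : Prop := ¬ D_validgroup arr k → out = validgroup_alt arr k
instance (arr : List Int) (k : Int) (out : Bool) : Decidable (Spec_validgroup arr k out) := by unfold Spec_validgroup; infer_instance

def pvDiffWitness_validgroup : List Int × Int := ([1, 1], -2)
def pvDiffWitnessOut_validgroup : Bool × Bool := (true, false)

-- ===== CLAIM (what is proved, stated in full; the proofs are below) =====
def Claim_unchanged_validgroup : Prop := ∀ (arr : List Int) (k : Int), Dom_validgroup arr k → Pre_validgroup arr k → Spec_validgroup arr k (validgroup arr k)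
def Claim_changed_validgroup : Prop := Dom_validgroup (pvDiffWitness_validgroup.1) (pvDiffWitness_validgroup.2) ∧ Pre_validgroup (pvDiffWitness_validgroup.1) (pvDiffWitness_validgroup.2) ∧ D_validgroup (pvDiffWitness_validgroup.1) (pvDiffWitness_validgroup.2) ∧ validgroup (pvDiffWitness_validgroup.1) (pvDiffWitness_validgroup.2) = pvDiffWitnessOut_validgroup.1 ∧ validgroup_alt (pvDiffWitness_validgroup.1) (pvDiffWitness_validgroup.2) = pvDiffWitnessOut_validgroup.2 ∧ pvDiffWitnessOut_validgroup.1 ≠ pvDiffWitnessOut_validgroup.2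
def Claim_exact_validgroup : Prop := ∀ (arr : List Int) (k : Int), Dom_validgroup arr k → Pre_validgroup arr k → D_validgroup arr k → validgroup arr k ≠ validgroup_alt arr k

-- ===== LEMMAS AND PROOFS =====

-- A's greedy, reformulated over the run-length decomposition (proof helpers only):
-- the bulk loop consumes all `cnt` groups starting at a value in one window subtraction.
def vgInnerB (freq : PySem.Dict Int Int) (v cnt : Int) : List Int → Option (PySem.Dict Int Int)
  | [] => some freq
  | i :: is =>
    let f' := freq.modify (v + i) 0 (· - cnt)
    if f'.getD (v + i) 0 < 0 then none
    else vgInnerB f' v cnt is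

def vgLoopB (freq : PySem.Dict Int Int) (k : Int) : List Int → Bool
  | [] => true
  | v :: vs =>
    if freq.getD v 0 = 0 then vgLoopB freq k vs
    else
      match vgInnerB freq v (freq.getD v 0) (PySem.List.pyRange 0 k 1) with
      | none => false
      | some f' => vgLoopB f' k vs

-- window subtraction: subtract r at every key v+i, i ∈ is
def vgBulk (d : PySem.Dict Int Int) (v r : Int) (is : List Int) : PySem.Dict Int Int :=
  is.foldl (fun d i => d.modify (v + i) 0 (· - r)) d

lemma getD_vgBulk (v r : Int) : ∀ (is : List Int) (d : PySem.Dict Int Int) (w : Int),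
    (vgBulk d v r is).getD w 0 = d.getD w 0 - r * (is.count (w - v)) := by
  intro is
  induction is with
  | nil => intro d w; simp [vgBulk]
  | cons i is ih =>
    intro d w
    show (vgBulk (d.modify (v + i) 0 (· - r)) v r is).getD w 0 = _
    rw [ih, PySem.Dict.getD_modify, List.count_cons]
    by_cases h : w = v + i
    · have : (w - v) = i := by omega
      simp [h]
      ring
    · have : ¬ ((w - v) = i) := by omega
      simp [h]
      have : ¬ (i = w - v) := by omega
      simp [this]

-- characterization of A's inner loop on a duplicate-free window
lemma vgInnerA_none (num : Int) : ∀ (is : List Int) (d : PySem.Dict Int Int), is.Nodup →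
    (vgInnerA d num is = none ↔ ∃ i ∈ is, d.getD (num + i) 0 = 0) := by
  intro is
  induction is with
  | nil => intro d _; simp [vgInnerA]
  | cons i is ih =>
    intro d hnd
    rw [List.nodup_cons] at hnd
    by_cases h : d.getD (num + i) 0 = 0
    · simp [vgInnerA, h]
    · have hsame : ∀ j ∈ is, (d.modify (num + i) 0 (· - 1)).getD (num + j) 0 = d.getD (num + j) 0 := by
        intro j hj
        rw [PySem.Dict.getD_modify]
        have hji : j ≠ i := fun he => hnd.1 (he ▸ hj)
        have : ¬ (num + j = num + i) := by omega
        simp [this]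
      simp only [vgInnerA, h, ite_false]
      rw [ih _ hnd.2]
      constructor
      · rintro ⟨j, hj, hz⟩
        exact ⟨j, List.mem_cons_of_mem _ hj, (hsame j hj) ▸ hz⟩
      · rintro ⟨j, hj, hz⟩
        rcases List.mem_cons.mp hj with he | hm
        · exact absurd (he ▸ hz) h
        · exact ⟨j, hm, (hsame j hm).symm ▸ hz⟩

lemma vgInnerA_some (num : Int) : ∀ (is : List Int) (d : PySem.Dict Int Int), is.Nodup →
    (¬ ∃ i ∈ is, d.getD (num + i) 0 = 0) → vgInnerA d num is = some (vgBulk d num 1 is) := by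
  intro is
  induction is with
  | nil => intro d _ _; simp [vgInnerA, vgBulk]
  | cons i is ih =>
    intro d hnd hne
    rw [List.nodup_cons] at hnd
    push Not at hne
    have hi : d.getD (num + i) 0 ≠ 0 := hne i (List.mem_cons_self ..)
    have hstep : vgBulk d num 1 (i :: is) = vgBulk (d.modify (num + i) 0 (· - 1)) num 1 is := rfl
    simp only [vgInnerA, hi, ite_false, hstep]
    apply ih _ hnd.2
    rintro ⟨j, hj, hz⟩
    have hji : j ≠ i := fun he => hnd.1 (he ▸ hj)
    rw [PySem.Dict.getD_modify] at hz
    have : ¬ (num + j = num + i) := by omega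
    rw [if_neg this] at hz
    exact hne j (List.mem_cons_of_mem _ hj) hz

-- characterization of the bulk inner loop on a duplicate-free window
lemma vgInnerB_none (v cnt : Int) : ∀ (is : List Int) (d : PySem.Dict Int Int), is.Nodup →
    (vgInnerB d v cnt is = none ↔ ∃ i ∈ is, d.getD (v + i) 0 < cnt) := by
  intro is
  induction is with
  | nil => intro d _; simp [vgInnerB]
  | cons i is ih =>
    intro d hnd
    rw [List.nodup_cons] at hnd
    have hself : (d.modify (v + i) 0 (· - cnt)).getD (v + i) 0 = d.getD (v + i) 0 - cnt :=
      PySem.Dict.getD_modify_self ..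
    by_cases h : d.getD (v + i) 0 < cnt
    · have : (d.modify (v + i) 0 (· - cnt)).getD (v + i) 0 < 0 := by omega
      refine iff_of_true ?_ ⟨i, List.mem_cons_self .., h⟩
      simp only [vgInnerB]
      rw [if_pos this]
    · have hnl : ¬ (d.modify (v + i) 0 (· - cnt)).getD (v + i) 0 < 0 := by omega
      have hsame : ∀ j ∈ is, (d.modify (v + i) 0 (· - cnt)).getD (v + j) 0 = d.getD (v + j) 0 := by
        intro j hj
        rw [PySem.Dict.getD_modify]
        have hji : j ≠ i := fun he => hnd.1 (he ▸ hj)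
        have : ¬ (v + j = v + i) := by omega
        simp [this]
      simp only [vgInnerB, hnl, ite_false]
      rw [ih _ hnd.2]
      constructor
      · rintro ⟨j, hj, hz⟩
        exact ⟨j, List.mem_cons_of_mem _ hj, (hsame j hj) ▸ hz⟩
      · rintro ⟨j, hj, hz⟩
        rcases List.mem_cons.mp hj with he | hm
        · exact absurd (he ▸ hz) h
        · exact ⟨j, hm, (hsame j hm).symm ▸ hz⟩

lemma vgInnerB_some (v cnt : Int) : ∀ (is : List Int) (d : PySem.Dict Int Int), is.Nodup →
    (¬ ∃ i ∈ is, d.getD (v + i) 0 < cnt) → vgInnerB d v cnt is = some (vgBulk d v cnt is) := by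
  intro is
  induction is with
  | nil => intro d _ _; simp [vgInnerB, vgBulk]
  | cons i is ih =>
    intro d hnd hne
    rw [List.nodup_cons] at hnd
    push Not at hne
    have hi : cnt ≤ d.getD (v + i) 0 := hne i (List.mem_cons_self ..)
    have hself : (d.modify (v + i) 0 (· - cnt)).getD (v + i) 0 = d.getD (v + i) 0 - cnt :=
      PySem.Dict.getD_modify_self ..
    have hnl : ¬ (d.modify (v + i) 0 (· - cnt)).getD (v + i) 0 < 0 := by omega
    have hstep : vgBulk d v cnt (i :: is) = vgBulk (d.modify (v + i) 0 (· - cnt)) v cnt is := rfl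
    simp only [vgInnerB, hnl, ite_false, hstep]
    apply ih _ hnd.2
    rintro ⟨j, hj, hz⟩
    have hji : j ≠ i := fun he => hnd.1 (he ▸ hj)
    rw [PySem.Dict.getD_modify] at hz
    have hne2 : ¬ (v + j = v + i) := by omega
    rw [if_neg hne2] at hz
    exact absurd hz (not_lt.mpr (hne j (List.mem_cons_of_mem _ hj)))

-- A's loops only consume the dict through getD
lemma vgInnerA_congr (num : Int) : ∀ (is : List Int) (d e : PySem.Dict Int Int),
    (∀ w, d.getD w 0 = e.getD w 0) →
    (vgInnerA d num is = none ∧ vgInnerA e num is = none) ∨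
      ∃ d' e', vgInnerA d num is = some d' ∧ vgInnerA e num is = some e' ∧
        ∀ w, d'.getD w 0 = e'.getD w 0 := by
  intro is
  induction is with
  | nil => intro d e h; exact Or.inr ⟨d, e, rfl, rfl, h⟩
  | cons i is ih =>
    intro d e h
    by_cases hz : d.getD (num + i) 0 = 0
    · left
      constructor <;> simp [vgInnerA, hz, ← h (num + i)]
    · have hz' : ¬ e.getD (num + i) 0 = 0 := by rw [← h]; exact hz
      have hmod : ∀ w, (d.modify (num + i) 0 (· - 1)).getD w 0
          = (e.modify (num + i) 0 (· - 1)).getD w 0 := by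
        intro w
        rw [PySem.Dict.getD_modify, PySem.Dict.getD_modify]
        by_cases hw : w = num + i <;> simp [hw, h]
      simpa [vgInnerA, hz, hz'] using ih (d.modify (num + i) 0 (· - 1)) (e.modify (num + i) 0 (· - 1)) hmod

lemma vgLoopA_congr (k : Int) : ∀ (l : List Int) (d e : PySem.Dict Int Int),
    (∀ w, d.getD w 0 = e.getD w 0) → vgLoopA d k l = vgLoopA e k l := by
  intro l
  induction l with
  | nil => intro d e _; rfl
  | cons num rest ih =>
    intro d e h
    by_cases hz : d.getD num 0 = 0
    · have hz' : e.getD num 0 = 0 := (h num) ▸ hz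
      simp only [vgLoopA, hz, hz', ite_true]
      exact ih d e h
    · have hz' : ¬ e.getD num 0 = 0 := by rw [← h]; exact hz
      simp only [vgLoopA, hz, hz', ite_false]
      rcases vgInnerA_congr num (PySem.List.pyRange 0 k 1) d e h with ⟨h1, h2⟩ | ⟨d', e', h1, h2, h3⟩
      · rw [h1, h2]
      · rw [h1, h2]
        exact ih d' e' h3

-- collapsing a run: processing c copies of v performs exactly (current count of v) groups
lemma vgRunA (k : Int) (hk : 0 < k) (v : Int) (rest : List Int) :
    ∀ (c : Nat) (d : PySem.Dict Int Int), (∀ w, 0 ≤ d.getD w 0) → d.getD v 0 ≤ (c : Int) →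
    vgLoopA d k (List.replicate c v ++ rest) =
      if ∃ i ∈ PySem.List.pyRange 0 k 1, d.getD (v + i) 0 < d.getD v 0 then false
      else vgLoopA (vgBulk d v (d.getD v 0) (PySem.List.pyRange 0 k 1)) k rest := by
  have hW : (PySem.List.pyRange 0 k 1).Nodup := PySem.List.nodup_pyRange_one 0 k
  have h0W : (0 : Int) ∈ PySem.List.pyRange 0 k 1 := by
    rw [PySem.List.mem_pyRange_one]; omega
  have hcnt : ∀ j : Int, ((PySem.List.pyRange 0 k 1).count j : Int)
      = if j ∈ PySem.List.pyRange 0 k 1 then 1 else 0 := by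
    intro j
    by_cases hj : j ∈ PySem.List.pyRange 0 k 1
    · rw [List.count_eq_one_of_mem hW hj]; simp [hj]
    · rw [List.count_eq_zero.mpr hj]; simp [hj]
  intro c
  induction c with
  | zero =>
    intro d hnn hle
    have hr : d.getD v 0 = 0 := le_antisymm (by exact_mod_cast hle) (hnn v)
    have hnf : ¬ ∃ i ∈ PySem.List.pyRange 0 k 1, d.getD (v + i) 0 < d.getD v 0 := by
      rintro ⟨i, _, hlt⟩
      have := hnn (v + i)
      omega
    rw [if_neg hnf]
    simp only [List.replicate, List.nil_append]
    apply vgLoopA_congr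
    intro w
    rw [getD_vgBulk, hr]
    ring
  | succ c ih =>
    intro d hnn hle
    have hrep : List.replicate (c + 1) v ++ rest = v :: (List.replicate c v ++ rest) := rfl
    by_cases hz : d.getD v 0 = 0
    · rw [hrep]
      simp only [vgLoopA, hz, ite_true]
      have hih := ih d hnn (by rw [hz]; exact_mod_cast Nat.zero_le c)
      rw [hz] at hih
      exact hih
    · have hr1 : 1 ≤ d.getD v 0 := by have := hnn v; omega
      by_cases hfail : ∃ i ∈ PySem.List.pyRange 0 k 1, d.getD (v + i) 0 = 0
      · have hf' : ∃ i ∈ PySem.List.pyRange 0 k 1, d.getD (v + i) 0 < d.getD v 0 := by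
          obtain ⟨i, hi, hiz⟩ := hfail
          exact ⟨i, hi, by omega⟩
        rw [if_pos hf', hrep]
        simp only [vgLoopA, hz, ite_false]
        rw [(vgInnerA_none v _ d hW).mpr hfail]
      · have hsome := vgInnerA_some v _ d hW hfail
        push Not at hfail
        rw [hrep]
        simp only [vgLoopA, hz, ite_false, hsome]
        set d1 := vgBulk d v 1 (PySem.List.pyRange 0 k 1) with hd1
        have hd1g : ∀ w, d1.getD w 0 = d.getD w 0
            - (if (w - v) ∈ PySem.List.pyRange 0 k 1 then 1 else 0) := by
          intro w
          rw [hd1, getD_vgBulk, hcnt]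
          split <;> ring
        have hd1v : d1.getD v 0 = d.getD v 0 - 1 := by
          rw [hd1g]
          simp [h0W]
        have hnn1 : ∀ w, 0 ≤ d1.getD w 0 := by
          intro w
          rw [hd1g]
          by_cases hm : (w - v) ∈ PySem.List.pyRange 0 k 1
          · have h1 := hfail (w - v) hm
            have h2 : v + (w - v) = w := by ring
            rw [h2] at h1
            have := hnn w
            simp [hm]
            omega
          · simp [hm]; exact hnn w
        have hle1 : d1.getD v 0 ≤ (c : Int) := by
          rw [hd1v]; push_cast at hle ⊢; omega
        rw [ih d1 hnn1 hle1]
        have hcond : (∃ i ∈ PySem.List.pyRange 0 k 1, d1.getD (v + i) 0 < d1.getD v 0)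
            ↔ (∃ i ∈ PySem.List.pyRange 0 k 1, d.getD (v + i) 0 < d.getD v 0) := by
          constructor <;> rintro ⟨i, hi, hlt⟩ <;> refine ⟨i, hi, ?_⟩
          · rw [hd1v, hd1g] at hlt
            have : v + i - v = i := by ring
            rw [this, if_pos hi] at hlt
            omega
          · rw [hd1v, hd1g]
            have : v + i - v = i := by ring
            rw [this, if_pos hi]
            omega
        by_cases hc : ∃ i ∈ PySem.List.pyRange 0 k 1, d.getD (v + i) 0 < d.getD v 0
        · rw [if_pos hc, if_pos (hcond.mpr hc)]
        · rw [if_neg hc, if_neg (fun h => hc (hcond.mp h))]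
          apply vgLoopA_congr
          intro w
          rw [hd1v, getD_vgBulk, getD_vgBulk, getD_vgBulk, hcnt]
          split <;> ring

-- trivial A-loop when k ≤ 0 (range(k) is empty)
lemma vgLoopA_nonpos (k : Int) (hk : k ≤ 0) : ∀ (l : List Int) (d : PySem.Dict Int Int),
    vgLoopA d k l = true := by
  have hW : PySem.List.pyRange 0 k 1 = [] := PySem.List.pyRange_one_eq_nil hk
  intro l
  induction l with
  | nil => intro d; rfl
  | cons num rest ih =>
    intro d
    by_cases hz : d.getD num 0 = 0 <;> simp [vgLoopA, hz, hW, vgInnerA, ih]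

-- run decomposition of the sorted list
def vgRuns : List Int → List (Int × Nat)
  | [] => []
  | v :: t =>
    match vgRuns t with
    | [] => [(v, 1)]
    | (w, c) :: rs => if v = w then (w, c + 1) :: rs else (v, 1) :: (w, c) :: rs

def vgFlat (rs : List (Int × Nat)) : List Int := rs.flatMap (fun p => List.replicate p.2 p.1)

lemma vgRuns_ne_nil : ∀ (l : List Int), vgRuns l = [] → l = [] := by
  intro l
  cases l with
  | nil => intro _; rfl
  | cons v t =>
    intro h
    simp only [vgRuns] at h
    rcases hm : vgRuns t with _ | ⟨⟨w, c⟩, rs⟩ <;> rw [hm] at h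
    · simp at h
    · by_cases hvw : v = w <;> simp [hvw] at h

lemma vgFlat_cons (p : Int × Nat) (rs : List (Int × Nat)) :
    vgFlat (p :: rs) = List.replicate p.2 p.1 ++ vgFlat rs := by
  simp [vgFlat]

lemma vgFlat_vgRuns : ∀ (l : List Int), vgFlat (vgRuns l) = l := by
  intro l
  induction l with
  | nil => rfl
  | cons v t ih =>
    simp only [vgRuns]
    rcases hm : vgRuns t with _ | ⟨⟨w, c⟩, rs⟩
    · rw [vgRuns_ne_nil t hm]
      rfl
    · rw [hm] at ih
      by_cases hvw : v = w
      · subst hvw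
        simp only [ite_true]
        rw [vgFlat_cons] at ih ⊢
        rw [List.replicate_succ, List.cons_append]
        rw [ih]
      · simp only [hvw, ite_false]
        rw [vgFlat_cons, ih]
        rfl

lemma vgRuns_fst_mem : ∀ (l : List Int) (p : Int × Nat), p ∈ vgRuns l → p.1 ∈ l := by
  intro l
  induction l with
  | nil => intro p h; simp [vgRuns] at h
  | cons v t ih =>
    intro p h
    simp only [vgRuns] at h
    rcases hm : vgRuns t with _ | ⟨⟨w, c⟩, rs⟩ <;> rw [hm] at h
    · simp at h
      simp [h]
    · by_cases hvw : v = w <;> simp only [hvw, ite_false, if_pos] at h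
      · rcases List.mem_cons.mp h with he | hmem
        · subst he
          rw [hvw]
          exact List.mem_cons_self ..
        · exact List.mem_cons_of_mem _ (ih _ (by rw [hm]; exact List.mem_cons_of_mem _ hmem))
      · rcases List.mem_cons.mp h with he | hmem
        · subst he; exact List.mem_cons_self ..
        · exact List.mem_cons_of_mem _ (ih _ (by rw [hm]; exact hmem))

lemma vgRuns_pos : ∀ (l : List Int) (p : Int × Nat), p ∈ vgRuns l → 1 ≤ p.2 := by
  intro l
  induction l with
  | nil => intro p h; simp [vgRuns] at h
  | cons v t ih =>
    intro p h
    simp only [vgRuns] at h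
    rcases hm : vgRuns t with _ | ⟨⟨w, c⟩, rs⟩ <;> rw [hm] at h
    · simp at h
      simp [h]
    · by_cases hvw : v = w <;> simp only [hvw, ite_false, if_pos] at h
      · rcases List.mem_cons.mp h with he | hmem
        · subst he; simp
        · exact ih _ (by rw [hm]; exact List.mem_cons_of_mem _ hmem)
      · rcases List.mem_cons.mp h with he | hmem
        · subst he; simp
        · exact ih _ (by rw [hm]; exact hmem)

lemma vgRuns_fst_lt : ∀ (l : List Int), l.Pairwise (· ≤ ·) →
    ((vgRuns l).map Prod.fst).Pairwise (· < ·) := by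
  intro l
  induction l with
  | nil => intro _; simp [vgRuns]
  | cons v t ih =>
    intro hp
    rw [List.pairwise_cons] at hp
    have iht := ih hp.2
    simp only [vgRuns]
    rcases hm : vgRuns t with _ | ⟨⟨w, c⟩, rs⟩ <;> rw [hm] at iht
    · simp
    · by_cases hvw : v = w
      · simpa [hvw] using iht
      · simp only [hvw, ite_false, List.map_cons]
        rw [List.pairwise_cons]
        refine ⟨?_, iht⟩
        intro x hx
        have hwt : w ∈ t := vgRuns_fst_mem t (w, c) (hm ▸ List.mem_cons_self ..)
        have hvw' : v < w := lt_of_le_of_ne (hp.1 w hwt) hvw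
        rcases List.mem_cons.mp hx with he | hmem
        · omega
        · have : w < x := (List.pairwise_cons.mp iht).1 x hmem
          omega

-- the core A-to-bulk equivalence: A over the flattened runs = bulk over the run heads
lemma mem_vgFlat (rs : List (Int × Nat)) (x : Int) (h : x ∈ vgFlat rs) :
    x ∈ rs.map Prod.fst := by
  simp only [vgFlat, List.mem_flatMap] at h
  obtain ⟨p, hp, hx⟩ := h
  rw [List.eq_of_mem_replicate hx]
  exact List.mem_map_of_mem hp

lemma count_vgFlat_cons (v : Int) (c : Nat) (rs : List (Int × Nat)) (w : Int) :
    (vgFlat ((v, c) :: rs)).count w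
      = (if w = v then c else 0) + (vgFlat rs).count w := by
  rw [vgFlat_cons, List.count_append, List.count_replicate]
  by_cases h : w = v
  · simp [h]
  · have h' : ¬ v = w := fun e => h e.symm
    simp [h, h']

lemma vgMain (k : Int) (hk : 0 < k) : ∀ (rs : List (Int × Nat)) (d e : PySem.Dict Int Int),
    ((rs.map Prod.fst).Pairwise (· < ·)) →
    (∀ p ∈ rs, 1 ≤ p.2) →
    (∀ w, d.getD w 0 = e.getD w 0) →
    (∀ w, 0 ≤ d.getD w 0) →
    (∀ w, d.getD w 0 ≤ ((vgFlat rs).count w : Int)) →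
    vgLoopA d k (vgFlat rs) = vgLoopB e k (rs.map Prod.fst) := by
  have hW : (PySem.List.pyRange 0 k 1).Nodup := PySem.List.nodup_pyRange_one 0 k
  have h0W : (0 : Int) ∈ PySem.List.pyRange 0 k 1 := by
    rw [PySem.List.mem_pyRange_one]; omega
  have hcnt : ∀ j : Int, ((PySem.List.pyRange 0 k 1).count j : Int)
      = if j ∈ PySem.List.pyRange 0 k 1 then 1 else 0 := by
    intro j
    by_cases hj : j ∈ PySem.List.pyRange 0 k 1
    · rw [List.count_eq_one_of_mem hW hj]; simp [hj]
    · rw [List.count_eq_zero.mpr hj]; simp [hj]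
  intro rs
  induction rs with
  | nil => intro d e _ _ _ _ _; rfl
  | cons p rs ih =>
    obtain ⟨v, c⟩ := p
    intro d e hpw hpos heq hnn hle
    have hvnotin : ∀ w, w ≠ v → ((vgFlat ((v, c) :: rs)).count w : Int) = ((vgFlat rs).count w : Int) := by
      intro w hw
      rw [count_vgFlat_cons]
      simp [hw]
    have hler : d.getD v 0 ≤ (c : Int) := by
      have h1 := hle v
      rw [count_vgFlat_cons] at h1
      have hvflat : (vgFlat rs).count v = 0 := by
        rw [List.count_eq_zero]
        intro hmem
        have := mem_vgFlat rs v hmem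
        have := (List.pairwise_cons.mp hpw).1 v this
        omega
      rw [hvflat] at h1
      simpa using h1
    have hflat : vgFlat ((v, c) :: rs) = List.replicate c v ++ vgFlat rs := rfl
    have hrunA := vgRunA k hk v (vgFlat rs) c d hnn hler
    rw [hflat, hrunA]
    have hmap : ((v, c) :: rs).map Prod.fst = v :: rs.map Prod.fst := rfl
    rw [hmap]
    by_cases hz : d.getD v 0 = 0
    · have hz' : e.getD v 0 = 0 := (heq v) ▸ hz
      have hnf : ¬ ∃ i ∈ PySem.List.pyRange 0 k 1, d.getD (v + i) 0 < d.getD v 0 := by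
        rintro ⟨i, _, hlt⟩
        have := hnn (v + i)
        omega
      rw [if_neg hnf]
      simp only [vgLoopB, hz', ite_true]
      have hA : vgLoopA (vgBulk d v (d.getD v 0) (PySem.List.pyRange 0 k 1)) k (vgFlat rs)
          = vgLoopA d k (vgFlat rs) := by
        apply vgLoopA_congr
        intro w
        rw [getD_vgBulk, hz]
        ring
      rw [hA]
      apply ih d e (List.pairwise_cons.mp hpw).2 (fun q hq => hpos q (List.mem_cons_of_mem _ hq)) heq hnn
      intro w
      by_cases hw : w = v
      · rw [hw, hz]
        exact_mod_cast Nat.zero_le _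
      · rw [← hvnotin w hw]
        exact hle w
    · have hz' : ¬ e.getD v 0 = 0 := by rw [← heq]; exact hz
      simp only [vgLoopB, hz', ite_false]
      by_cases hf : ∃ i ∈ PySem.List.pyRange 0 k 1, d.getD (v + i) 0 < d.getD v 0
      · rw [if_pos hf]
        have hf' : ∃ i ∈ PySem.List.pyRange 0 k 1, e.getD (v + i) 0 < e.getD v 0 := by
          obtain ⟨i, hi, hlt⟩ := hf
          exact ⟨i, hi, by rw [← heq, ← heq]; exact hlt⟩
        rw [(vgInnerB_none v _ _ e hW).mpr hf']
      · rw [if_neg hf]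
        push Not at hf
        have hf' : ¬ ∃ i ∈ PySem.List.pyRange 0 k 1, e.getD (v + i) 0 < e.getD v 0 := by
          rintro ⟨i, hi, hlt⟩
          rw [← heq, ← heq] at hlt
          exact absurd hlt (not_lt.mpr (hf i hi))
        rw [vgInnerB_some v _ _ e hW hf']
        set r := d.getD v 0 with hr
        have hre : e.getD v 0 = r := (heq v).symm
        rw [hre]
        have hg : ∀ w, (vgBulk d v r (PySem.List.pyRange 0 k 1)).getD w 0
            = d.getD w 0 - (if (w - v) ∈ PySem.List.pyRange 0 k 1 then r else 0) := by
          intro w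
          rw [getD_vgBulk, hcnt]
          split <;> ring
        have hg' : ∀ w, (vgBulk e v r (PySem.List.pyRange 0 k 1)).getD w 0
            = e.getD w 0 - (if (w - v) ∈ PySem.List.pyRange 0 k 1 then r else 0) := by
          intro w
          rw [getD_vgBulk, hcnt]
          split <;> ring
        apply ih _ _ (List.pairwise_cons.mp hpw).2 (fun q hq => hpos q (List.mem_cons_of_mem _ hq))
        · intro w
          rw [hg, hg', heq]
        · intro w
          rw [hg]
          by_cases hm : (w - v) ∈ PySem.List.pyRange 0 k 1
          · have h1 := hf (w - v) hm
            have h2 : v + (w - v) = w := by ring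
            rw [h2] at h1
            have := hnn w
            simp [hm]
            omega
          · simp [hm]; exact hnn w
        · intro w
          rw [hg]
          by_cases hw : w = v
          · have : w - v = 0 := by omega
            rw [hw] at *
            simp only [this, h0W, ite_true]
            have hvflat : ((vgFlat rs).count v : Int) = 0 := by
              norm_cast
              rw [List.count_eq_zero]
              intro hmem
              have := mem_vgFlat rs v hmem
              have := (List.pairwise_cons.mp hpw).1 v this
              omega
            rw [hvflat]
            omega
          · rw [← hvnotin w hw]
            have hr0 : 0 ≤ r := hnn v
            have := hle w
            split <;> omega

-- ===== bulk-to-scan machinery =====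

-- groups opened at the last os.length consecutive values ending at p that still cover w
def vgCover (os : List Int) (p k w : Int) : Int :=
  (os.drop (w - k - p + os.length).toNat).sum

lemma vgSumNonneg : ∀ (os : List Int), (∀ x ∈ os, 0 ≤ x) → 0 ≤ os.sum := by
  intro os
  induction os with
  | nil => intro _; simp
  | cons x t ih =>
    intro h
    have := h x (List.mem_cons_self ..)
    have := ih (fun y hy => h y (List.mem_cons_of_mem _ hy))
    simp only [List.sum_cons]
    omega

lemma vgAllZero : ∀ (os : List Int), (∀ x ∈ os, 0 ≤ x) → os.sum ≤ 0 → ∀ x ∈ os, x = 0 := by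
  intro os
  induction os with
  | nil => intro _ _ x hx; simp at hx
  | cons y t ih =>
    intro h hs x hx
    have hy := h y (List.mem_cons_self ..)
    have ht : 0 ≤ t.sum := vgSumNonneg t (fun z hz => h z (List.mem_cons_of_mem _ hz))
    simp only [List.sum_cons] at hs
    rcases List.mem_cons.mp hx with he | hm
    · omega
    · exact ih (fun z hz => h z (List.mem_cons_of_mem _ hz)) (by omega) x hm

lemma vgCover_nil (p k w : Int) : vgCover [] p k w = 0 := by
  simp [vgCover]

lemma vgCover_full (os : List Int) (p k : Int) (hlen : (os.length : Int) ≤ k - 1) :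
    vgCover os p k (p + 1) = os.sum := by
  have h : (p + 1 - k - p + (os.length : Int)) ≤ 0 := by omega
  unfold vgCover
  rw [Int.toNat_of_nonpos h]
  simp

lemma vgCover_zero (os : List Int) (p k w : Int) (h : ∀ x ∈ os, x = 0) :
    vgCover os p k w = 0 := by
  unfold vgCover
  exact List.sum_eq_zero (fun x hx => h x (List.mem_of_mem_drop hx))

lemma vgCover_le_sum (os : List Int) (p k w : Int) (h : ∀ x ∈ os, 0 ≤ x) :
    vgCover os p k w ≤ os.sum := by
  unfold vgCover
  set n := (w - k - p + (os.length : Int)).toNat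
  have hsplit : os.take n ++ os.drop n = os := List.take_append_drop n os
  have htn : 0 ≤ (os.take n).sum :=
    vgSumNonneg _ (fun x hx => h x (List.mem_of_mem_take hx))
  have : os.sum = (os.take n).sum + (os.drop n).sum := by
    conv_lhs => rw [← hsplit]
    rw [List.sum_append]
  omega

lemma vgCover_append (os : List Int) (o p k w : Int) :
    vgCover (os ++ [o]) (p + 1) k w = vgCover os p k w + (if w ≤ p + k then o else 0) := by
  unfold vgCover
  have hidx : (w - k - (p + 1) + ((os ++ [o]).length : Int)) = (w - k - p + (os.length : Int)) := by
    simp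
    omega
  rw [hidx]
  set t : Int := w - k - p + (os.length : Int) with ht
  by_cases hc : w ≤ p + k
  · have htle : t.toNat ≤ os.length := by omega
    rw [if_pos hc, List.drop_append_of_le_length htle, List.sum_append]
    simp
  · have htgt : os.length < t.toNat := by omega
    have h1 : (os ++ [o]).drop t.toNat = [] := by
      apply List.drop_eq_nil_of_le
      simp
      omega
    have h2 : os.drop t.toNat = [] := by
      apply List.drop_eq_nil_of_le
      omega
    rw [if_neg hc, h1, h2]
    simp

lemma vgCover_pop (h : Int) (t : List Int) (p k w : Int) (hw : p < w)
    (hlen : (((h :: t).length : Int)) = k) :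
    vgCover (h :: t) p k w = vgCover t p k w := by
  unfold vgCover
  have hlt : (t.length : Int) = k - 1 := by
    simp at hlen
    omega
  have h1 : (w - k - p + ((h :: t).length : Int)) = w - p := by
    simp at hlen ⊢
    omega
  have h2 : (w - k - p + (t.length : Int)) = w - p - 1 := by omega
  rw [h1, h2]
  have h3 : (w - p).toNat = (w - p - 1).toNat + 1 := by omega
  rw [h3, List.drop_succ_cons]

-- the post-step window: append the newly opened groups, pop the expiring slot
lemma vgStepTail (f : PySem.Dict Int Int) (k : Int) (vs : List Int) (v c : Int) (os : List Int)
    (hos : ∀ x ∈ os, 0 ≤ x) (hlen : (os.length : Int) ≤ k - 1) (hge : os.sum ≤ c) :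
    ∃ os₂ : List Int,
      (if (((os ++ [c - os.sum]).length : Int)) = k then
         vgScanB f k vs (os ++ [c - os.sum]).tail (c - (os ++ [c - os.sum]).headD 0) (some v)
       else vgScanB f k vs (os ++ [c - os.sum]) c (some v))
        = vgScanB f k vs os₂ os₂.sum (some v)
      ∧ (∀ x ∈ os₂, 0 ≤ x) ∧ ((os₂.length : Int) ≤ k - 1)
      ∧ (∀ w, v < w → vgCover os₂ v k w = vgCover os (v - 1) k w + (if w ≤ v - 1 + k then c - os.sum else 0)) := by
  have hW2sum : (os ++ [c - os.sum]).sum = c := by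
    rw [List.sum_append]
    simp
  have hW2nonneg : ∀ x ∈ os ++ [c - os.sum], 0 ≤ x := by
    intro x hx
    rcases List.mem_append.mp hx with hm | hm
    · exact hos x hm
    · simp at hm
      omega
  have hcov2 : ∀ w, v < w → vgCover (os ++ [c - os.sum]) v k w
      = vgCover os (v - 1) k w + (if w ≤ v - 1 + k then c - os.sum else 0) := by
    intro w _
    have := vgCover_append os (c - os.sum) (v - 1) k w
    simpa using this
  by_cases hL : (((os ++ [c - os.sum]).length : Int)) = k
  · rcases hW2 : os ++ [c - os.sum] with _ | ⟨h, t⟩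
    · exact absurd hW2 (by simp)
    · refine ⟨t, ?_, ?_, ?_, ?_⟩
      · rw [if_pos (hW2 ▸ hL)]
        have hsum : c - h = t.sum := by
          have := hW2sum
          rw [hW2] at this
          simp only [List.sum_cons] at this
          omega
        simp only [List.tail_cons, List.headD_cons]
        rw [hsum]
      · intro x hx
        exact hW2nonneg x (hW2 ▸ List.mem_cons_of_mem _ hx)
      · have := hL
        rw [hW2] at this
        simp at this ⊢
        omega
      · intro w hw
        rw [← vgCover_pop h t v k w hw (hW2 ▸ hL), ← hW2]
        exact hcov2 w hw
  · refine ⟨os ++ [c - os.sum], ?_, hW2nonneg, ?_, hcov2⟩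
    · rw [if_neg hL, hW2sum]
    · simp at hL ⊢
      omega

-- an over-committed scan state can never finish with carry 0
lemma vgScanFalse (f : PySem.Dict Int Int) (k : Int) (hf : ∀ w, 0 ≤ f.getD w 0) :
    ∀ (vs : List Int) (os : List Int) (p : Int),
    (∀ x ∈ os, 0 ≤ x) → ((os.length : Int) ≤ k - 1) →
    (∃ w, p < w ∧ f.getD w 0 < vgCover os p k w) →
    vgScanB f k vs os os.sum (some p) = false := by
  intro vs
  induction vs with
  | nil =>
    intro os p hos hlen ⟨w, hw, hlt⟩
    have h1 := hf w
    have h2 := vgCover_le_sum os p k w hos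
    have : os.sum ≠ 0 := by omega
    simp [vgScanB, this]
  | cons v vs ih =>
    intro os p hos hlen ⟨w, hw, hlt⟩
    by_cases hgap : v = p + 1
    · have hg : (decide (v ≠ p + 1)) = false := by simp [hgap]
      by_cases hc : f.getD v 0 < os.sum
      · simp only [vgScanB, hg, Bool.false_and, Bool.false_eq_true, if_false]
        rw [if_pos hc]
      · have hwv : w ≠ v := by
          intro he
          rw [he, hgap] at hlt
          rw [vgCover_full os p k hlen] at hlt
          rw [hgap] at hc
          omega
        have hwv' : v < w := by omega
        obtain ⟨os₂, heq, h1, h2, hcov⟩ :=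
          vgStepTail f k vs v (f.getD v 0) os hos hlen (not_lt.mp hc)
        simp only [vgScanB, hg, Bool.false_and, Bool.false_eq_true, if_false, if_neg hc]
        rw [heq]
        apply ih os₂ v h1 h2
        refine ⟨w, hwv', ?_⟩
        have hcw := hcov w hwv'
        have hveq : v - 1 = p := by omega
        rw [hveq] at hcw
        have : 0 ≤ f.getD v 0 - os.sum := by omega
        rw [hcw]
        split <;> omega
    · by_cases hcar : 0 < os.sum
      · have hg : (decide (v ≠ p + 1) && decide (0 < os.sum)) = true := by
          simp [hgap, hcar]
        simp only [vgScanB, hg, if_true]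
      · have hz := vgAllZero os hos (not_lt.mp hcar)
        have : vgCover os p k w = 0 := vgCover_zero os p k w hz
        have := hf w
        omega

-- B's scan loop returns False for negative k on values of positive count
lemma vgScanNeg (f : PySem.Dict Int Int) (k : Int) (hk : k < 0) :
    ∀ (vs : List Int) (window : List Int) (carry : Int) (prev : Option Int),
    (∀ v ∈ vs, 0 < f.getD v 0) → (vs ≠ [] ∨ 0 < carry) →
    vgScanB f k vs window carry prev = false := by
  intro vs
  induction vs with
  | nil =>
    intro window carry prev _ hne
    have hc : 0 < carry := hne.resolve_left (fun h => h rfl)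
    have : carry ≠ 0 := by omega
    simp [vgScanB, this]
  | cons v vs ih =>
    intro window carry prev hpos _
    have hv : 0 < f.getD v 0 := hpos v (List.mem_cons_self ..)
    simp only [vgScanB]
    set isGap : Bool := (match prev with
      | none => true
      | some p => decide (v ≠ p + 1)) with hisGap
    by_cases hg : (isGap && decide (0 < carry)) = true
    · rw [if_pos hg]
    · rw [if_neg hg]
      by_cases hc : f.getD v 0 < carry
      · rw [if_pos hc]
      · rw [if_neg hc]
        have hlen : ¬ ((((if isGap then [] else window) ++ [f.getD v 0 - carry]).length : Int) = k) := by
          have : 0 ≤ ((if isGap then [] else window).length : Int) := by positivity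
          simp only [List.length_append, List.length_cons, List.length_nil]
          push_cast
          omega
        rw [if_neg hlen]
        exact ih _ _ _ (fun x hx => hpos x (List.mem_cons_of_mem _ hx)) (Or.inr hv)

-- with carry 0 and an empty window the initial `prev` is irrelevant
lemma vgScanStart (f : PySem.Dict Int Int) (k : Int) (vs : List Int) (p : Int) :
    vgScanB f k vs [] 0 none = vgScanB f k vs [] 0 (some p) := by
  cases vs with
  | nil => rfl
  | cons v vs =>
    simp only [vgScanB]
    simp [ite_self]

-- the lockstep invariant: the bulk loop on the residual dict equals the scan on the counts
lemma vgStep (f : PySem.Dict Int Int) (k : Int) (hk : 1 ≤ k) (hf : ∀ w, 0 ≤ f.getD w 0) :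
    ∀ (vs : List Int) (d : PySem.Dict Int Int) (os : List Int) (p : Int),
    vs.Pairwise (· < ·) →
    (∀ v ∈ vs, p < v) →
    (∀ w, p < w → (0 < f.getD w 0 ↔ w ∈ vs)) →
    (∀ x ∈ os, 0 ≤ x) →
    ((os.length : Int) ≤ k - 1) →
    (∀ w, p < w → d.getD w 0 = f.getD w 0 - vgCover os p k w) →
    (∀ w, p < w → 0 ≤ d.getD w 0) →
    vgLoopB d k vs = vgScanB f k vs os os.sum (some p) := by
  have hW : (PySem.List.pyRange 0 k 1).Nodup := PySem.List.nodup_pyRange_one 0 k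
  intro vs
  induction vs with
  | nil =>
    intro d os p _ _ h3 h4 h5 h6 h7
    have hsum : os.sum = 0 := by
      by_contra hne
      have hpos : 0 < os.sum := lt_of_le_of_ne (vgSumNonneg os h4) (Ne.symm hne)
      have h6p := h6 (p + 1) (by omega)
      have h7p := h7 (p + 1) (by omega)
      rw [vgCover_full os p k h5] at h6p
      have : 0 < f.getD (p + 1) 0 := by omega
      have := (h3 (p + 1) (by omega)).mp this
      simp at this
    simp [vgLoopB, vgScanB, hsum]
  | cons v vs ih =>
    intro d os p h1 h2 h3 h4 h5 h6 h7
    have hv : p < v := h2 v (List.mem_cons_self ..)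
    have hvpos : 0 < f.getD v 0 := (h3 v hv).mpr (List.mem_cons_self ..)
    have hcnt1 : ∀ w : Int, v < w → ((PySem.List.pyRange 0 k 1).count (w - v) : Int)
        = if w ≤ v + k - 1 then 1 else 0 := by
      intro w hw
      by_cases hm : (w - v) ∈ PySem.List.pyRange 0 k 1
      · rw [List.count_eq_one_of_mem hW hm]
        rw [PySem.List.mem_pyRange_one] at hm
        rw [if_pos (by omega)]
        simp
      · rw [List.count_eq_zero.mpr hm]
        rw [PySem.List.mem_pyRange_one] at hm
        rw [if_neg (by omega)]
        simp
    -- the bulk loop's step on v, given that no subtraction goes negative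
    have hbulkstep : (¬ ∃ i ∈ PySem.List.pyRange 0 k 1, d.getD (v + i) 0 < d.getD v 0) →
        ∃ d₂, vgLoopB d k (v :: vs) = vgLoopB d₂ k vs ∧
          (∀ w, v < w → d₂.getD w 0 = d.getD w 0 - (if w ≤ v + k - 1 then d.getD v 0 else 0)) := by
      intro hnd
      by_cases hz : d.getD v 0 = 0
      · refine ⟨d, by simp only [vgLoopB, hz, ite_true], ?_⟩
        intro w hw
        rw [hz]
        split <;> ring
      · refine ⟨vgBulk d v (d.getD v 0) (PySem.List.pyRange 0 k 1), ?_, ?_⟩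
        · simp only [vgLoopB, hz, ite_false]
          rw [vgInnerB_some v _ _ d hW hnd]
        · intro w hw
          rw [getD_vgBulk, hcnt1 w hw]
          split <;> ring
    have hbulkdead : (∃ i ∈ PySem.List.pyRange 0 k 1, d.getD (v + i) 0 < d.getD v 0) →
        d.getD v 0 ≠ 0 → vgLoopB d k (v :: vs) = false := by
      intro hdead hz
      simp only [vgLoopB, hz, ite_false]
      rw [(vgInnerB_none v _ _ d hW).mpr hdead]
    -- continuation: with the post-step scan state in hand, recurse
    have key : ∀ (os₂ : List Int) (d₂ : PySem.Dict Int Int),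
        (¬ ∃ i ∈ PySem.List.pyRange 0 k 1, d.getD (v + i) 0 < d.getD v 0) →
        (∀ x ∈ os₂, 0 ≤ x) → ((os₂.length : Int) ≤ k - 1) →
        (∀ w, v < w → vgCover os₂ v k w = vgCover os p k w + (if w ≤ v + k - 1 then d.getD v 0 else 0)) →
        (∀ w, v < w → d₂.getD w 0 = d.getD w 0 - (if w ≤ v + k - 1 then d.getD v 0 else 0)) →
        vgLoopB d₂ k vs = vgScanB f k vs os₂ os₂.sum (some v) := by
      intro os₂ d₂ hnd hn2 hl2 hcov hd₂
      apply ih d₂ os₂ v (List.pairwise_cons.mp h1).2 (List.pairwise_cons.mp h1).1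
      · intro w hw
        rw [h3 w (by omega)]
        constructor
        · intro hm
          rcases List.mem_cons.mp hm with he | hm2
          · omega
          · exact hm2
        · exact fun hm => List.mem_cons_of_mem _ hm
      · exact hn2
      · exact hl2
      · intro w hw
        rw [hd₂ w hw, h6 w (by omega), hcov w hw]
        ring
      · intro w hw
        rw [hd₂ w hw]
        by_cases hcase : w ≤ v + k - 1
        · rw [if_pos hcase]
          push Not at hnd
          have h8 := hnd (w - v) (by rw [PySem.List.mem_pyRange_one]; omega)
          have h9 : v + (w - v) = w := by ring
          rw [h9] at h8
          omega
        · rw [if_neg hcase, sub_zero]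
          exact h7 w (by omega)
    by_cases hgap : v = p + 1
    -- ===== no gap: v = p + 1 =====
    · have hg : (decide (v ≠ p + 1)) = false := by simp [hgap]
      have hdv : d.getD v 0 = f.getD v 0 - os.sum := by
        have h := h6 v hv
        rw [hgap] at h
        rw [vgCover_full os p k h5] at h
        rw [hgap]
        exact h
      have hge : os.sum ≤ f.getD v 0 := by
        have := h7 v hv
        omega
      have hnc : ¬ (f.getD v 0 < os.sum) := by omega
      obtain ⟨os₂, heq, hn2, hl2, hcov⟩ := vgStepTail f k vs v (f.getD v 0) os h4 h5 hge
      have hcov2 : ∀ w, v < w → vgCover os₂ v k w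
          = vgCover os p k w + (if w ≤ v + k - 1 then d.getD v 0 else 0) := by
        intro w hw
        rw [hcov w hw, hdv]
        have hpe : v - 1 = p := by omega
        rw [hpe]
        have hiff : (w ≤ p + k) ↔ (w ≤ v + k - 1) := by omega
        by_cases hcase : w ≤ p + k
        · rw [if_pos hcase, if_pos (hiff.mp hcase)]
        · rw [if_neg hcase, if_neg (fun h => hcase (hiff.mpr h))]
      have hscan : vgScanB f k (v :: vs) os os.sum (some p)
          = vgScanB f k vs os₂ os₂.sum (some v) := by
        rw [← heq]
        simp only [vgScanB, hg, Bool.false_and, Bool.false_eq_true, if_false, if_neg hnc]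
      rw [hscan]
      by_cases hdead : ∃ i ∈ PySem.List.pyRange 0 k 1, d.getD (v + i) 0 < d.getD v 0
      · have hz : d.getD v 0 ≠ 0 := by
          intro h0
          obtain ⟨i, hi, hlt⟩ := hdead
          rw [PySem.List.mem_pyRange_one] at hi
          have := h7 (v + i) (by omega)
          omega
        rw [hbulkdead hdead hz]
        symm
        obtain ⟨i, hi, hlt⟩ := hdead
        rw [PySem.List.mem_pyRange_one] at hi
        have hine : i ≠ 0 := by
          intro h0
          rw [h0, add_zero] at hlt
          omega
        apply vgScanFalse f k hf vs os₂ v hn2 hl2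
        refine ⟨v + i, by omega, ?_⟩
        have h6w := h6 (v + i) (by omega)
        have hcw := hcov2 (v + i) (by omega)
        rw [if_pos (by omega : v + i ≤ v + k - 1)] at hcw
        omega
      · obtain ⟨d₂, hb, hd₂⟩ := hbulkstep hdead
        rw [hb]
        exact key os₂ d₂ hdead hn2 hl2 hcov2 hd₂
    -- ===== gap: v ≥ p + 2 =====
    · have hg : (decide (v ≠ p + 1)) = true := by simp [hgap]
      by_cases hcar : 0 < os.sum
      · -- impossible: open groups force value p+1 to be present
        exfalso
        have h6p := h6 (p + 1) (by omega)
        have h7p := h7 (p + 1) (by omega)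
        rw [vgCover_full os p k h5] at h6p
        have : 0 < f.getD (p + 1) 0 := by omega
        have hmem := (h3 (p + 1) (by omega)).mp this
        rcases List.mem_cons.mp hmem with he | hm
        · omega
        · have := (List.pairwise_cons.mp h1).1 _ hm
          omega
      · -- carry is zero: the run restarts at v
        have hz0 := vgAllZero os h4 (not_lt.mp hcar)
        have hsum : os.sum = 0 := List.sum_eq_zero hz0
        have hcov0 : ∀ w, vgCover os p k w = 0 := fun w => vgCover_zero os p k w hz0
        have hdv : d.getD v 0 = f.getD v 0 := by
          have := h6 v hv
          rw [hcov0] at this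
          omega
        obtain ⟨os₂, heq, hn2, hl2, hcov⟩ :=
          vgStepTail f k vs v (f.getD v 0) ([] : List Int) (by simp) (by simp; omega) (by simp; omega)
        have hcov2 : ∀ w, v < w → vgCover os₂ v k w
            = vgCover os p k w + (if w ≤ v + k - 1 then d.getD v 0 else 0) := by
          intro w hw
          rw [hcov w hw, hcov0, vgCover_nil, hdv]
          simp only [List.sum_nil, sub_zero, zero_add]
          have hiff : (w ≤ v - 1 + k) ↔ (w ≤ v + k - 1) := by omega
          by_cases hcase : w ≤ v - 1 + k
          · rw [if_pos hcase, if_pos (hiff.mp hcase)]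
          · rw [if_neg hcase, if_neg (fun h => hcase (hiff.mpr h))]
        have hd0 : (decide ((0:Int) < 0)) = false := by decide
        have hnc0 : ¬ (f.getD v 0 < (0 : Int)) := by omega
        have hscan : vgScanB f k (v :: vs) os os.sum (some p)
            = vgScanB f k vs os₂ os₂.sum (some v) := by
          rw [← heq]
          simp only [vgScanB, hg, hsum, hd0, Bool.and_false, Bool.false_eq_true, if_false,
            List.sum_nil, List.nil_append, sub_zero, if_neg hnc0, reduceIte]
        rw [hscan]
        by_cases hdead : ∃ i ∈ PySem.List.pyRange 0 k 1, d.getD (v + i) 0 < d.getD v 0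
        · have hz : d.getD v 0 ≠ 0 := by
            intro h0
            obtain ⟨i, hi, hlt⟩ := hdead
            rw [PySem.List.mem_pyRange_one] at hi
            have := h7 (v + i) (by omega)
            omega
          rw [hbulkdead hdead hz]
          symm
          obtain ⟨i, hi, hlt⟩ := hdead
          rw [PySem.List.mem_pyRange_one] at hi
          have hine : i ≠ 0 := by
            intro h0
            rw [h0, add_zero] at hlt
            omega
          apply vgScanFalse f k hf vs os₂ v hn2 hl2
          refine ⟨v + i, by omega, ?_⟩
          have h6w := h6 (v + i) (by omega)
          rw [hcov0] at h6w
          have hcw := hcov2 (v + i) (by omega)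
          rw [hcov0, if_pos (by omega : v + i ≤ v + k - 1)] at hcw
          omega
        · obtain ⟨d₂, hb, hd₂⟩ := hbulkstep hdead
          rw [hb]
          exact key os₂ d₂ hdead hn2 hl2 hcov2 hd₂

-- A = B for positive k (main case)
lemma vgPos (arr : List Int) (k : Int) (hk : 1 ≤ k)
    (hmod : ¬ PySem.Int.mod (arr.length : Int) k ≠ 0) :
    validgroup arr k = validgroup_alt arr k := by
  unfold validgroup validgroup_alt
  rw [if_neg hmod, if_neg hmod]
  set S := PySem.List.sorted arr (fun x => x) false with hS
  set rs := vgRuns S with hrs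
  have hSsorted : S.Pairwise (· ≤ ·) := PySem.List.sorted_pairwise arr (fun x => x)
  have hflat : vgFlat rs = S := vgFlat_vgRuns S
  have hperm : S.Perm arr := PySem.List.sorted_perm arr (fun x => x) false
  have hpw : (rs.map Prod.fst).Pairwise (· < ·) := vgRuns_fst_lt S hSsorted
  have hkeys : PySem.List.sorted (PySem.Dict.counter arr).keys (fun x => x) false
      = rs.map Prod.fst := by
    rw [PySem.Dict.keys_counter]
    apply PySem.List.sorted_eq_of_perm_of_pairwise_lt
    · apply (List.perm_ext_iff_of_nodup (hpw.imp (fun h => ne_of_lt h))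
        (PySem.Set.nodup_ofList arr)).mpr
      intro x
      rw [PySem.Set.mem_ofList]
      constructor
      · intro hx
        obtain ⟨p, hp, he⟩ := List.mem_map.mp hx
        have hxS : p.1 ∈ S := vgRuns_fst_mem S p hp
        exact hperm.mem_iff.mp (he ▸ hxS)
      · intro hx
        have hxS : x ∈ S := hperm.mem_iff.mpr hx
        exact mem_vgFlat rs x (hflat ▸ hxS)
    · exact hpw
  set f := PySem.Dict.counter arr with hfdef
  have hcnt1 : ∀ w, (PySem.Dict.counter S).getD w 0 = f.getD w 0 := by
    intro w
    rw [PySem.Dict.getD_counter, PySem.Dict.getD_counter]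
    exact_mod_cast hperm.count_eq w
  have hcnt2 : ∀ w, 0 ≤ (PySem.Dict.counter S).getD w 0 := by
    intro w
    rw [PySem.Dict.getD_counter]
    exact_mod_cast Nat.zero_le _
  have hcnt3 : ∀ w, (PySem.Dict.counter S).getD w 0 ≤ ((vgFlat rs).count w : Int) := by
    intro w
    rw [PySem.Dict.getD_counter, hflat]
  have hAB : vgLoopA (PySem.Dict.counter S) k S = vgLoopB f k (rs.map Prod.fst) := by
    have hmain := vgMain k (by omega) rs (PySem.Dict.counter S) f hpw
      (fun p hp => vgRuns_pos S p hp) hcnt1 hcnt2 hcnt3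
    rw [hflat] at hmain
    exact hmain
  have hfnn : ∀ w, 0 ≤ f.getD w 0 := by
    intro w
    rw [hfdef, PySem.Dict.getD_counter]
    exact_mod_cast Nat.zero_le _
  have hcompl : ∀ w, (0 < f.getD w 0 ↔ w ∈ rs.map Prod.fst) := by
    intro w
    rw [hfdef, PySem.Dict.getD_counter]
    rw [← hkeys, PySem.List.mem_sorted, PySem.Dict.keys_counter, PySem.Set.mem_ofList]
    constructor
    · intro h
      have : 0 < arr.count w := by exact_mod_cast h
      exact List.count_pos_iff.mp this
    · intro h
      have : 0 < arr.count w := List.count_pos_iff.mpr h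
      exact_mod_cast this
  have hBS : vgLoopB f k (rs.map Prod.fst) = vgScanB f k (rs.map Prod.fst) [] 0 none := by
    cases hcase : rs.map Prod.fst with
    | nil => simp [vgLoopB, vgScanB]
    | cons v vs =>
      rw [vgScanStart f k (v :: vs) (v - 1)]
      have := vgStep f k hk hfnn (v :: vs) f [] (v - 1)
        (hcase ▸ hpw) ?_ ?_ (by simp) (by simp; omega) ?_ ?_
      · simpa using this
      · intro x hx
        rcases List.mem_cons.mp hx with he | hm
        · omega
        · have := (List.pairwise_cons.mp (hcase ▸ hpw)).1 x hm
          omega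
      · intro w _
        rw [hcompl w, hcase]
      · intro w _
        rw [vgCover_nil]
        ring
      · intro w _
        exact hfnn w
  show vgLoopA (PySem.Dict.counter S) k S
      = vgScanB f k (PySem.List.sorted f.keys (fun x => x) false) [] 0 none
  rw [show PySem.List.sorted f.keys (fun x => x) false = rs.map Prod.fst from hkeys]
  rw [hAB, hBS]

-- ===== VERDICT (by name: the statements are the Claim_ definitions above) =====
theorem validgroup_spec : Claim_unchanged_validgroup := by
  intro arr k _ hpre hnd
  show validgroup arr k = validgroup_alt arr k
  by_cases hmod : PySem.Int.mod (arr.length : Int) k ≠ 0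
  · unfold validgroup validgroup_alt
    rw [if_pos hmod, if_pos hmod]
  · rcases lt_trichotomy k 0 with hneg | hzero | hpos
    · -- negative k outside D_: the array must be empty
      have hdvd : k ∣ (arr.length : Int) :=
        (PySem.Int.mod_eq_zero_iff_dvd (arr.length : Int) k).mp (by omega)
      have harr : arr = [] := by
        by_contra hne
        exact hnd ⟨hneg, hne, Int.emod_eq_zero_of_dvd hdvd⟩
      subst harr
      unfold validgroup validgroup_alt
      rw [if_neg hmod, if_neg hmod]
      rfl
    · exact absurd hzero hpre
    · exact vgPos arr k (by omega) hmod

theorem validgroup_changed : Claim_changed_validgroup := by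
  unfold Claim_changed_validgroup
  decide

theorem validgroup_tight : Claim_exact_validgroup := by
  intro arr k _ _ hd
  obtain ⟨hneg, hne, hdvd⟩ := hd
  have hmod : ¬ PySem.Int.mod (arr.length : Int) k ≠ 0 := by
    have : k ∣ (arr.length : Int) := Int.dvd_of_emod_eq_zero hdvd
    have := (PySem.Int.mod_eq_zero_iff_dvd (arr.length : Int) k).mpr this
    omega
  have hA : validgroup arr k = true := by
    unfold validgroup
    rw [if_neg hmod]
    exact vgLoopA_nonpos k (by omega) _ _
  have hB : validgroup_alt arr k = false := by
    unfold validgroup_alt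
    rw [if_neg hmod]
    set f := PySem.Dict.counter arr with hf
    set heads := PySem.List.sorted f.keys (fun x => x) false with hheads
    have hpos : ∀ v ∈ heads, 0 < f.getD v 0 := by
      intro v hv
      rw [hheads, PySem.List.mem_sorted] at hv
      rw [hf, PySem.Dict.keys_counter, PySem.Set.mem_ofList] at hv
      rw [hf, PySem.Dict.getD_counter]
      exact_mod_cast List.count_pos_iff.mpr hv
    have hnenil : heads ≠ [] := by
      obtain ⟨a, arr', rfl⟩ : ∃ a arr', arr = a :: arr' := by
        cases arr with
        | nil => exact absurd rfl hne
        | cons a arr' => exact ⟨a, arr', rfl⟩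
      intro hnil
      have : a ∈ heads := by
        rw [hheads, PySem.List.mem_sorted, hf, PySem.Dict.keys_counter, PySem.Set.mem_ofList]
        exact List.mem_cons_self ..
      rw [hnil] at this
      simp at this
    exact vgScanNeg f k hneg heads [] 0 none hpos (Or.inl hnenil)
  rw [hA, hB]
  simp
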